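-- pv_equiv track=rewrite | github.com/MauriceCalvert/andante | motifs/subject_generator.py | _find_high_climax
-- ===== SOURCE A (Python) =====
-- def _find_high_climax(pitches: list[int]) -> tuple[int, int]:
--     """Find unique high-point index and pitch, or (-1, 0) if none."""
--     hi_val = max(pitches)
--     candidates = [i for i in range(len(pitches)) if pitches[i] == hi_val]
--     if len(candidates) != 1:
--         return (-1, 0)
--     ci = candidates[0]
--     if ci == 0 or ci == len(pitches) - 1:
--         return (-1, 0)
--     if pitches[ci + 1] >= pitches[ci]:
--         return (-1, 0)
--     return (ci, hi_val)
-- ===== SOURCE B (Python) =====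
-- def _find_high_climax(pitches: list[int]) -> tuple[int, int]:
--     """Find unique interior high-point index and pitch, or (-1, 0) if none."""
--     if not pitches:
--         raise ValueError("max() arg is an empty sequence")
--     best = pitches[0]
--     idx = 0
--     count = 1
--     for i in range(1, len(pitches)):
--         v = pitches[i]
--         if v > best:
--             best, idx, count = v, i, 1
--         elif v == best:
--             count += 1
--     if count != 1 or idx == 0 or idx == len(pitches) - 1:
--         return (-1, 0)
--     return (idx, best)
-- ===== Notes on version B (the rewrite author's own statement) =====
-- stated objective: alternative
-- what changed: Replaces the max() pass plus index-comprehension pass (and the redundant neighbour check, provably unreachable when the maximum is unique) with a single scan maintaining the running maximum, its first index and its occurrence count.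
import Mathlib
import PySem

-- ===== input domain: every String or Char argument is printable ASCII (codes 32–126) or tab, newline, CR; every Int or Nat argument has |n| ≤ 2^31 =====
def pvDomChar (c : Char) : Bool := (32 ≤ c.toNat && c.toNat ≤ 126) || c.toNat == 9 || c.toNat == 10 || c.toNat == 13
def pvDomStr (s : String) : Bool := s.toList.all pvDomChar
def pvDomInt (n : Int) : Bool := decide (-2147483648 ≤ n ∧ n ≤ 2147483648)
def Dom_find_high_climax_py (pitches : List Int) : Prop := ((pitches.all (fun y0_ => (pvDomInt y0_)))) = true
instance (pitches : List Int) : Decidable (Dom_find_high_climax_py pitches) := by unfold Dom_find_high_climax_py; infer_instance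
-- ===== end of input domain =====

-- ===== PORT A =====
-- B changes: one maintained-state scan instead of max() plus an index comprehension; same values.
-- Both programs raise ValueError on the empty list (max() in A, explicitly in B): Pre_ excludes it.
def find_high_climax_py (pitches : List Int) : Int × Int :=
  match PySem.List.max? pitches (fun y => y) with
  | none => (-1, 0)  -- max([]) raises ValueError; excluded by Pre_
  | some hi_val =>
    let candidates := (List.range pitches.length).filter (fun i => pitches.getD i 0 = hi_val)
    if candidates.length ≠ 1 then (-1, 0)
    else
      let ci := candidates.headD 0
      if ci = 0 ∨ ci = pitches.length - 1 then (-1, 0)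
      else if pitches.getD (ci + 1) 0 ≥ pitches.getD ci 0 then (-1, 0)
      else ((ci : Int), hi_val)

-- ===== PORT B =====
-- the for-loop of Source B: state (best, idx, count), i the index of the head of the remaining list
def fhcLoop : List Int → Int → Nat → Nat → Nat → Int × Nat × Nat
  | [], best, idx, count, _ => (best, idx, count)
  | v :: rest, best, idx, count, i =>
      if v > best then fhcLoop rest v i 1 (i + 1)
      else if v = best then fhcLoop rest best idx (count + 1) (i + 1)
      else fhcLoop rest best idx count (i + 1)

def find_high_climax_py_alt (pitches : List Int) : Int × Int :=
  match pitches with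
  | [] => (-1, 0)  -- Source B raises ValueError here; excluded by Pre_
  | p :: rest =>
    let s := fhcLoop rest p 0 1 1
    if s.2.2 ≠ 1 ∨ s.2.1 = 0 ∨ s.2.1 = pitches.length - 1 then (-1, 0)
    else ((s.2.1 : Int), s.1)

-- ===== PRECONDITION & SPEC =====
-- Pre_ excludes only the empty list, on which both A (via max()) and B raise ValueError.
def Pre_find_high_climax_py (pitches : List Int) : Prop := pitches ≠ []
instance (pitches : List Int) : Decidable (Pre_find_high_climax_py pitches) := by unfold Pre_find_high_climax_py; infer_instance
def pvWitness_find_high_climax_py : List Int := [1, 3, 2]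
def Spec_find_high_climax_py (pitches : List Int) (out : Int × Int) : Prop := out = find_high_climax_py_alt pitches
instance (pitches : List Int) (out : Int × Int) : Decidable (Spec_find_high_climax_py pitches out) := by unfold Spec_find_high_climax_py; infer_instance

-- ===== CLAIM (what is proved, stated in full; the proofs are below) =====
def Claim_equal_find_high_climax_py : Prop := ∀ (pitches : List Int), Dom_find_high_climax_py pitches → Pre_find_high_climax_py pitches → Spec_find_high_climax_py pitches (find_high_climax_py pitches)

-- ===== LEMMAS AND PROOFS =====

-- the candidate-index list of port A
def cand (l : List Int) (M : Int) : List Nat :=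
  (List.range l.length).filter (fun i => l.getD i 0 = M)

theorem cand_cons (a : Int) (l : List Int) (M : Int) :
    cand (a :: l) M = (if a = M then [0] else []) ++ (cand l M).map (· + 1) := by
  unfold cand
  rw [show (a :: l).length = l.length + 1 from rfl, List.range_succ_eq_map]
  simp only [List.filter_cons, List.filter_map]
  by_cases h : a = M <;> simp [h] <;> rfl

theorem cand_length (l : List Int) (M : Int) : (cand l M).length = l.count M := by
  induction l with
  | nil => simp [cand]
  | cons a t ih =>
    rw [cand_cons, List.length_append, List.length_map, ih, List.count_cons]
    by_cases h : a = M
    · have hb : (a == M) = true := by simp [h]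
      rw [if_pos h, hb]
      simp [Nat.add_comm]
    · have hb : (a == M) = false := by simp [h]
      rw [if_neg h, hb]
      simp

theorem cand_head (l : List Int) (M : Int) (hM : M ∈ l) :
    (cand l M).headD 0 = l.idxOf M := by
  induction l with
  | nil => cases hM
  | cons a t ih =>
    rw [cand_cons]
    by_cases h : a = M
    · simp [h, List.idxOf_cons_self]
    · have hMt : M ∈ t := by
        rcases List.mem_cons.mp hM with h' | h'
        · exact absurd h'.symm h
        · exact h'
      have hne : (cand t M) ≠ [] := by
        intro hnil
        have hlen := cand_length t M
        rw [hnil] at hlen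
        simp at hlen
        exact (List.count_eq_zero.mp hlen.symm) hMt
      obtain ⟨x, xs, hx⟩ := List.exists_cons_of_ne_nil hne
      have hidx := List.idxOf_cons_ne t (show a ≠ M from h)
      have hx' : (cand t M).headD 0 = x := by rw [hx]; rfl
      rw [ih hMt] at hx'
      simp [h, hx, hidx, ← hx']

theorem cand_mem (l : List Int) (M : Int) (j : Nat) :
    j ∈ cand l M ↔ j < l.length ∧ l.getD j 0 = M := by
  unfold cand
  simp [List.mem_filter, List.mem_range]

-- the loop invariant of port B: final best / idx / count in terms of foldl max, idxOf, count
theorem fhcLoop_spec (l : List Int) : ∀ (best : Int) (idx count i : Nat),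
    fhcLoop l best idx count i =
      (l.foldl max best,
       (if l.foldl max best = best then idx else i + l.idxOf (l.foldl max best)),
       (if l.foldl max best = best then count else 0) + l.count (l.foldl max best)) := by
  induction l with
  | nil => intro best idx count i; simp [fhcLoop]
  | cons v t ih =>
    intro best idx count i
    have hle : ∀ (a : Int), a ≤ t.foldl max a ∧ ∀ y ∈ t, y ≤ t.foldl max a :=
      fun a => PySem.List.le_foldl_max t a
    by_cases h1 : v > best
    · have hmax : max best v = v := by omega
      have hBv : v ≤ t.foldl max v := (hle v).1
      rw [show fhcLoop (v :: t) best idx count i = fhcLoop t v i 1 (i + 1) by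
            simp [fhcLoop, h1],
          ih v i 1 (i + 1)]
      simp only [List.foldl_cons, hmax]
      have hBnb : t.foldl max v ≠ best := by omega
      simp only [if_neg hBnb]
      by_cases h2 : t.foldl max v = v
      · simp only [if_pos h2]
        rw [h2, List.idxOf_cons_self, List.count_cons]
        simp only [Prod.mk.injEq, beq_self_eq_true, Bool.false_eq_true, if_true, if_false,
            Nat.add_zero, Nat.zero_add, true_and, and_true]
        try omega
        try trivial
      · have hvne : v ≠ t.foldl max v := fun he => h2 he.symm
        have hb : (v == t.foldl max v) = false := by simp [hvne]
        simp only [if_neg h2]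
        rw [List.idxOf_cons_ne t hvne, List.count_cons, hb]
        simp only [Prod.mk.injEq, beq_self_eq_true, Bool.false_eq_true, if_true, if_false,
            Nat.add_zero, Nat.zero_add, true_and, and_true]
        try omega
        try trivial
    · have hmax : max best v = best := by omega
      by_cases h2 : v = best
      · rw [show fhcLoop (v :: t) best idx count i = fhcLoop t best idx (count + 1) (i + 1) by
              simp [fhcLoop, h1, h2],
            ih best idx (count + 1) (i + 1)]
        simp only [List.foldl_cons, hmax]
        by_cases h3 : t.foldl max best = best
        · have hb : (v == t.foldl max best) = true := by simp [h2, h3]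
          simp only [if_pos h3]
          rw [List.count_cons, hb]
          simp only [Prod.mk.injEq, beq_self_eq_true, Bool.false_eq_true, if_true, if_false,
            Nat.add_zero, Nat.zero_add, true_and, and_true]
          try omega
          try trivial
        · have hvne : v ≠ t.foldl max best := fun he => h3 (h2 ▸ he.symm)
          have hb : (v == t.foldl max best) = false := by simp [hvne]
          simp only [if_neg h3]
          rw [List.idxOf_cons_ne t hvne, List.count_cons, hb]
          simp only [Prod.mk.injEq, beq_self_eq_true, Bool.false_eq_true, if_true, if_false,
            Nat.add_zero, Nat.zero_add, true_and, and_true]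
          try omega
          try trivial
      · rw [show fhcLoop (v :: t) best idx count i = fhcLoop t best idx count (i + 1) by
              simp [fhcLoop, h1, h2],
            ih best idx count (i + 1)]
        simp only [List.foldl_cons, hmax]
        have hvB : v ≠ t.foldl max best := by
          have := (hle best).1; omega
        have hb : (v == t.foldl max best) = false := by simp [hvB]
        by_cases h3 : t.foldl max best = best
        · simp only [if_pos h3]
          rw [List.count_cons, hb]
          simp only [Prod.mk.injEq, beq_self_eq_true, Bool.false_eq_true, if_true, if_false,
            Nat.add_zero, Nat.zero_add, true_and, and_true]
          try omega
          try trivial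
        · simp only [if_neg h3]
          rw [List.idxOf_cons_ne t hvB, List.count_cons, hb]
          simp only [Prod.mk.injEq, beq_self_eq_true, Bool.false_eq_true, if_true, if_false,
            Nat.add_zero, Nat.zero_add, true_and, and_true]
          try omega
          try trivial

-- ===== VERDICT (by name: the statement is the Claim_ definition above) =====
theorem find_high_climax_py_spec : Claim_equal_find_high_climax_py := by
  intro pitches _ hpre
  unfold Spec_find_high_climax_py
  match pitches, hpre with
  | p :: rest, _ =>
    set l : List Int := p :: rest with hl
    set M : Int := rest.foldl max p with hM
    have hMmem : M ∈ l := by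
      rcases PySem.List.foldl_max_mem rest p with h | h
      · rw [hM, h]; exact List.mem_cons_self
      · exact List.mem_cons_of_mem _ h
    have hMmax : ∀ y ∈ l, y ≤ M := by
      intro y hy
      rcases List.mem_cons.mp hy with h | h
      · rw [h]; exact (PySem.List.le_foldl_max rest p).1
      · exact (PySem.List.le_foldl_max rest p).2 y h
    -- unfold port A to the cand form
    have hA : find_high_climax_py l =
        (if (cand l M).length ≠ 1 then (-1, 0)
         else
           let ci := (cand l M).headD 0
           if ci = 0 ∨ ci = l.length - 1 then ((-1 : Int), (0 : Int))
           else if l.getD (ci + 1) 0 ≥ l.getD ci 0 then (-1, 0)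
           else ((ci : Int), M)) := by
      unfold find_high_climax_py
      rw [hl, PySem.List.max?_id_cons]
      rfl
    -- unfold port B via the loop invariant
    have hB : find_high_climax_py_alt l =
        (if l.count M ≠ 1 ∨ l.idxOf M = 0 ∨ l.idxOf M = l.length - 1 then (-1, 0)
         else ((l.idxOf M : Int), M)) := by
      show (let s := fhcLoop rest p 0 1 1
            if s.2.2 ≠ 1 ∨ s.2.1 = 0 ∨ s.2.1 = (p :: rest).length - 1 then ((-1 : Int), (0 : Int))
            else ((s.2.1 : Int), s.1)) = _
      rw [fhcLoop_spec rest p 0 1 1, ← hM]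
      by_cases h : M = p
      · have hidx0 : l.idxOf M = 0 := by
          rw [hl, h]; exact List.idxOf_cons_self ..
        have hcnt : l.count M = rest.count M + 1 := by
          rw [hl, List.count_cons]
          simp [h]
        simp only [if_pos h]
        simp [hidx0, hcnt]
      · have hpe : p ≠ M := fun he => h he.symm
        have hidx1 : l.idxOf M = rest.idxOf M + 1 := by
          rw [hl, List.idxOf_cons_ne rest hpe]
        have hcnt : l.count M = rest.count M := by
          have hb : ¬ ((p == M) = true) := by simp; omega
          rw [hl, List.count_cons, if_neg hb]
          omega
        simp only [if_neg h]
        have e1 : 1 + rest.idxOf M = l.idxOf M := by omega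
        simp only [Nat.zero_add, e1, ← hcnt, hl]
    -- compare the two normal forms
    rw [hA, hB, cand_length]
    by_cases hc : l.count M ≠ 1
    · simp [hc]
    · push_neg at hc
      have hcand1 : (cand l M).length = 1 := by rw [cand_length]; exact hc
      obtain ⟨ci, hci⟩ := List.length_eq_one_iff.mp hcand1
      have hhead : (cand l M).headD 0 = ci := by rw [hci]; rfl
      have hciIdx : ci = l.idxOf M := by rw [← hhead, cand_head l M hMmem]
      have hciProp : ci < l.length ∧ l.getD ci 0 = M := by
        rw [← cand_mem, hci]
        exact List.mem_singleton.mpr rfl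
      rw [if_neg (by simp [hc]), hhead]
      by_cases hedge : ci = 0 ∨ ci = l.length - 1
      · rw [if_pos hedge, if_pos (by rw [← hciIdx]; simp [hc, hedge])]
      · rw [if_neg hedge]
        push_neg at hedge
        have hci1lt : ci + 1 < l.length := by
          have := hciProp.1; omega
        have hnext : l.getD (ci + 1) 0 ≠ M := by
          intro hne
          have hmem : (ci + 1) ∈ cand l M := (cand_mem l M (ci + 1)).mpr ⟨hci1lt, hne⟩
          rw [hci] at hmem
          have := List.mem_singleton.mp hmem
          omega
        have hnextle : l.getD (ci + 1) 0 ≤ M := by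
          have hmem : l.getD (ci + 1) 0 ∈ l := by
            rw [List.getD_eq_getElem?_getD, List.getElem?_eq_getElem hci1lt]
            exact List.getElem_mem hci1lt
          exact hMmax _ hmem
        have hlt : ¬ (l.getD (ci + 1) 0 ≥ l.getD ci 0) := by
          rw [hciProp.2]; omega
        rw [if_neg hlt, if_neg (by rw [← hciIdx]; simp [hc, hedge.1, hedge.2]), hciIdx]
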